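-- pv_equiv track=rewrite | github.com/PioBuczek/Training | fun/11.py | uniqly
-- ===== SOURCE A (Python) =====
-- def uniqly(dict1):
--     counts = {}
--     for values in dict1.values():
--         if values not in counts:
--             counts[values] = 1
--         else:
--             counts[values] += 1
--     list1 = []
--     for keys, values in counts.items():
--         if values == 1:
--             list1.append(keys)
--     return list1
-- ===== SOURCE B (Python) =====
-- def uniqly(dict1):
--     vals = list(dict1.values())
--     return [v for v in vals if vals.count(v) == 1]
-- ===== Notes on version B (the rewrite author's own statement) =====
-- stated objective: simpler
-- what changed: Drops A's frequency-dict build and items scan entirely: B is a single comprehension that keeps each value whose multiplicity, found by scanning the value list with list.count, is exactly 1 (quadratic brute force instead of a hash table).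
import Mathlib
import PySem

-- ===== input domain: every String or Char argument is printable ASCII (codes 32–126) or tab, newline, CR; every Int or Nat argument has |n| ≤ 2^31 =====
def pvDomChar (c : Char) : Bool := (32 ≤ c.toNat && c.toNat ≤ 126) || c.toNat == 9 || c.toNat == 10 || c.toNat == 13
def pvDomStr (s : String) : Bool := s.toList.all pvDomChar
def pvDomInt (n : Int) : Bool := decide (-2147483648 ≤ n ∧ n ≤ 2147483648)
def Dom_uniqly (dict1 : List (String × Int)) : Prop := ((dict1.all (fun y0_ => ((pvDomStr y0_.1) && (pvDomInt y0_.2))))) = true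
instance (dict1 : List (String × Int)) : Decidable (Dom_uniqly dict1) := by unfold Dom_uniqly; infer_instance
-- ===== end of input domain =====

-- B replaces A's frequency-dict build + items scan with one comprehension that tests each
-- value's multiplicity by list.count over the value list (simpler; brute force, not faster).


-- ===== PORT A =====
-- counts = {}; for values in dict1.values(): if values not in counts: counts[values] = 1 else: counts[values] += 1
def uniqlyCounts (vs : List Int) : PySem.Dict Int Int :=
  vs.foldl
    (fun counts v =>
      if !(counts.contains v) then counts.insert v 1
      else counts.modify v 0 (· + 1))
    PySem.Dict.empty
-- list1 = []; for keys, values in counts.items(): if values == 1: list1.append(keys); return list1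
def uniqly (dict1 : List (String × Int)) : List Int :=
  (uniqlyCounts (PySem.Dict.ofList dict1).values).items.foldl
    (fun list1 kv => if kv.2 == 1 then list1 ++ [kv.1] else list1) []

-- ===== PORT B =====
-- vals = list(dict1.values()); return [v for v in vals if vals.count(v) == 1]
def uniqly_alt (dict1 : List (String × Int)) : List Int :=
  let vals := (PySem.Dict.ofList dict1).values
  vals.filter (fun v => PySem.List.count vals v == 1)

-- ===== PRECONDITION & SPEC =====
def Spec_uniqly (dict1 : List (String × Int)) (out : List Int) : Prop := out = uniqly_alt dict1
instance (dict1 : List (String × Int)) (out : List Int) : Decidable (Spec_uniqly dict1 out) := by unfold Spec_uniqly; infer_instance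

-- ===== CLAIM (what is proved, stated in full; the proofs are below) =====
def Claim_equal_uniqly : Prop := ∀ (dict1 : List (String × Int)), Dom_uniqly dict1 → Spec_uniqly dict1 (uniqly dict1)

-- ===== LEMMAS AND PROOFS =====

-- A's counting loop (insert 1 on a fresh key, += 1 on a seen key) builds Counter(vs).
theorem uniqlyCounts_eq_counter (vs : List Int) :
    uniqlyCounts vs = PySem.Dict.counter vs := by
  rw [uniqlyCounts, PySem.Dict.counter]
  congr 1
  funext d v
  by_cases h : d.contains v = true
  · simp [h, PySem.Dict.modify]
  · rw [if_pos (by simp [h]), PySem.Dict.modify,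
      PySem.Dict.getD_of_not_contains d 0 (by simpa using h)]
    norm_num

-- Filtering the distinct values equals filtering all values when the predicate
-- only holds on values occurring exactly once.
theorem filter_ofList_eq_filter (xs : List Int) (p : Int → Bool)
    (h : ∀ v, p v = true → xs.count v ≤ 1) :
    (PySem.Set.ofList xs).filter p = xs.filter p := by
  induction xs with
  | nil => rfl
  | cons x xs ih =>
    rw [PySem.Set.ofList_cons]
    have hle : ∀ v, p v = true → xs.count v ≤ 1 := by
      intro v hv
      have := h v hv
      rw [List.count_cons] at this
      omega
    by_cases hp : p x = true
    · have hx : xs.count x = 0 := by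
        have := h x hp
        rw [List.count_cons, if_pos (by simp)] at this
        omega
      have hxmem : x ∉ xs := List.count_eq_zero.mp hx
      have hdisc : (PySem.Set.ofList xs).discard x = PySem.Set.ofList xs := by
        rw [PySem.Set.discard]
        refine List.filter_eq_self.mpr (fun y hy => ?_)
        have hyx : y ∈ xs := (PySem.Set.mem_ofList xs y).mp hy
        simp only [Bool.not_eq_true', beq_eq_false_iff_ne, ne_eq]
        rintro rfl; exact hxmem hyx
      rw [List.filter_cons_of_pos hp, hdisc, List.filter_cons_of_pos hp, ih hle]
    · rw [List.filter_cons_of_neg hp, List.filter_cons_of_neg hp, PySem.Set.discard,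
        List.filter_filter]
      have heq : ∀ y, (p y && !y == x) = p y := by
        intro y
        by_cases hyx : y = x
        · subst hyx; simp [hp]
        · simp [hyx]
      simp only [heq]
      exact ih hle

-- A's result in closed form: the values occurring exactly once, in order.
theorem uniqly_closed (vs : List Int) :
    (uniqlyCounts vs).items.foldl
      (fun list1 kv => if kv.2 == 1 then list1 ++ [kv.1] else list1) [] =
    vs.filter (fun v => ((vs.count v : Int)) == 1) := by
  rw [uniqlyCounts_eq_counter, PySem.Dict.items_counter,
    PySem.List.foldl_append_if (p := fun kv : Int × Int => kv.2 == 1) (f := (·.1)),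
    List.filter_map, List.map_map]
  simp only [Function.comp_def, List.nil_append, List.map_id']
  exact filter_ofList_eq_filter vs _ (fun v hv => by
    simp only [beq_iff_eq] at hv
    omega)

-- ===== VERDICT (by name: the statement is the Claim_ definition above) =====
theorem uniqly_spec : Claim_equal_uniqly := by
  intro dict1 _
  unfold Spec_uniqly uniqly uniqly_alt
  rw [uniqly_closed]
  refine List.filter_congr fun v _ => ?_
  simp only [PySem.List.count_eq]
  by_cases h : List.count v (PySem.Dict.ofList dict1).values = 1
  · simp [h]
  · simp only [beq_eq_false_iff_ne, ne_eq, Nat.cast_inj] at *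
    by_cases h2 : ((List.count v (PySem.Dict.ofList dict1).values : Int) == 1) = true
    · exfalso; apply h; have := beq_iff_eq.mp h2; omega
    · simp only [Bool.not_eq_true] at h2; rw [h2]; symm; simp [h]
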